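-- pv_equiv track=rewrite | github.com/CraftJarvis/OpenHA | openagents/agents/utils/action_mapping.py | get_non_markov_sequences
-- ===== SOURCE A (Python) =====
-- from typing import Union,List,Dict,Any,Optional
--
-- def split_continuous_segments(frame_ids: List[int]) -> List[List[int]]:
--     """
--     将已排序的 frame_ids 拆成若干连续段。
--     """
--     if not frame_ids:
--         return []
--
--     segments = []
--     current_segment = [frame_ids[0]]
--
--     for idx in range(1, len(frame_ids)):
--         # 如果当前帧与前一帧连续，就放进同一段
--         if frame_ids[idx] == frame_ids[idx - 1] + 1:
--             current_segment.append(frame_ids[idx])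
--         else:
--             segments.append(current_segment)
--             current_segment = [frame_ids[idx]]
--     segments.append(current_segment)
--     return segments
--
-- def sliding_windows(
--         segment: List[int],
--         chunk_len: int,
--         sliding_window_len: int
-- ) -> List[List[int]]:
--     """
--     在一个连续段上做滑动窗口抽取。
--     """
--
--     windows = []
--     i = 0
--     n = len(segment)
--     while i < n:
--         windows.append(segment[i:i + chunk_len])
--         i += sliding_window_len
--     return windows
--
-- def get_non_markov_sequences(
--         frame_ids: List[int],
--         chunk_len: int,
--         sliding_window_len: int
-- ) -> List[List[int]]:
--     """
--     主入口：先拆段，再做滑窗，最大限度利用所有帧。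
--     """
--     if chunk_len <= 0 or sliding_window_len <= 0:
--         raise ValueError("chunk_len 和 sliding_window_len 必须为正整数")
--     # 去重 & 排序，确保算法假设成立
--     cleaned = sorted(set(frame_ids))
--     segments = split_continuous_segments(cleaned)
--
--     all_windows = []
--     for seg in segments:
--         all_windows.extend(sliding_windows(seg, chunk_len, sliding_window_len))
--     return all_windows
-- ===== SOURCE B (Python) =====
-- def get_non_markov_sequences(frame_ids, chunk_len, sliding_window_len):
--     """Group frames into runs with a dict keyed by value-minus-rank (v - i is
--     constant exactly on a maximal consecutive run of sorted distinct values),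
--     then window each run; no adjacency comparison or boundary scan anywhere."""
--     if chunk_len <= 0 or sliding_window_len <= 0:
--         raise ValueError("chunk_len 和 sliding_window_len 必须为正整数")
--     runs = {}
--     for i, v in enumerate(sorted(set(frame_ids))):
--         runs.setdefault(v - i, []).append(v)
--     return [run[j:j + chunk_len]
--             for run in runs.values()
--             for j in range(0, len(run), sliding_window_len)]
-- ===== Notes on version B (the rewrite author's own statement) =====
-- stated objective: alternative
-- what changed: B replaces A's adjacency-scan segment splitter plus per-segment while-loop windower with a dict that groups the sorted distinct frames by the value-minus-rank invariant (v - i is constant exactly on a maximal consecutive run), then windows each dict value; there is no boundary comparison of neighbouring frames anywhere in B.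
import Mathlib
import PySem

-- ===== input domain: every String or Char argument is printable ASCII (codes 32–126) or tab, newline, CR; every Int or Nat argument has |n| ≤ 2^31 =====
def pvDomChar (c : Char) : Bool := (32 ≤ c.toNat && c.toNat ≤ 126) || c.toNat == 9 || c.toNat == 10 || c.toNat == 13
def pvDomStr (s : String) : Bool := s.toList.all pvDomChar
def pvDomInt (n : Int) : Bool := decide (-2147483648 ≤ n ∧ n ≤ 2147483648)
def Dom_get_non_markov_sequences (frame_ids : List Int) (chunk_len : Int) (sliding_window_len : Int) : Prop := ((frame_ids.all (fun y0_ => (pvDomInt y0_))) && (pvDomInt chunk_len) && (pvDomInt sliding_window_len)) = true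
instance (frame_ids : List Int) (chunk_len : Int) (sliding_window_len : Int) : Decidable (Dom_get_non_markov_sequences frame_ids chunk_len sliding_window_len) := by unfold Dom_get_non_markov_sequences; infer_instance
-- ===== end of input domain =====

-- B replaces A's adjacency-scan segment splitter + per-segment while-loop windower with a dict
-- grouping the sorted distinct frames by the value-minus-rank key v - i (constant exactly on a
-- maximal consecutive run), then windows each dict value (objective: alternative algorithm).

-- ===== PORT A =====
-- split_continuous_segments: the 'for idx in range(1, len)' loop walking (prev, current_segment, rest)
def splitGo (prev : Int) (cur : List Int) : List Int → List (List Int)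
  | [] => [cur]
  | y :: ys => if y = prev + 1 then splitGo y (cur ++ [y]) ys else cur :: splitGo y [y] ys

def split_continuous_segments : List Int → List (List Int)
  | [] => []
  | x :: xs => splitGo x [x] xs

-- sliding_windows: 'while i < n: windows.append(segment[i:i+chunk_len]); i += sliding_window_len'
-- (the 0 < step conjunct is a totality guard only; the caller guarantees it)
def swLoop (segment : List Int) (chunk_len : Int) (step : Nat) (i : Nat) : List (List Int) :=
  if _h : i < segment.length ∧ 0 < step then
    PySem.List.slice segment (some (i : Int)) (some ((i : Int) + chunk_len)) ::
      swLoop segment chunk_len step (i + step)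
  else []
termination_by segment.length - i
decreasing_by omega

def sliding_windows (segment : List Int) (chunk_len : Int) (sliding_window_len : Int) : List (List Int) :=
  swLoop segment chunk_len sliding_window_len.toNat 0

def get_non_markov_sequences (frame_ids : List Int) (chunk_len : Int) (sliding_window_len : Int) : List (List Int) :=
  if chunk_len ≤ 0 ∨ sliding_window_len ≤ 0 then []  -- Python raises ValueError here; excluded by Pre_
  else
    let cleaned := PySem.List.sorted (PySem.Set.ofList frame_ids) (fun x => x) false
    let segments := split_continuous_segments cleaned
    segments.foldl (fun acc seg => acc ++ sliding_windows seg chunk_len sliding_window_len) []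

-- ===== PORT B =====
-- 'for i, v in enumerate(sorted(set(frame_ids))): runs.setdefault(v - i, []).append(v)'
def buildRuns (d : PySem.Dict Int (List Int)) (i : Nat) : List Int → PySem.Dict Int (List Int)
  | [] => d
  | v :: vs => buildRuns (d.modify (v - (i : Int)) [] (· ++ [v])) (i + 1) vs

-- '[run[j:j+chunk_len] for run in runs.values() for j in range(0, len(run), sliding_window_len)]'
def get_non_markov_sequences_alt (frame_ids : List Int) (chunk_len : Int) (sliding_window_len : Int) : List (List Int) :=
  if chunk_len ≤ 0 ∨ sliding_window_len ≤ 0 then []  -- Python raises ValueError here; excluded by Pre_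
  else
    let runs := buildRuns PySem.Dict.empty 0 (PySem.List.sorted (PySem.Set.ofList frame_ids) (fun x => x) false)
    runs.values.flatMap (fun run =>
      (PySem.List.pyRange 0 (run.length : Int) sliding_window_len).map
        (fun j => PySem.List.slice run (some j) (some (j + chunk_len))))

-- ===== PRECONDITION & SPEC =====
-- A raises ValueError iff chunk_len ≤ 0 or sliding_window_len ≤ 0; Pre_ excludes exactly those inputs.
def Pre_get_non_markov_sequences (frame_ids : List Int) (chunk_len : Int) (sliding_window_len : Int) : Prop :=
  0 < chunk_len ∧ 0 < sliding_window_len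
instance (frame_ids : List Int) (chunk_len : Int) (sliding_window_len : Int) : Decidable (Pre_get_non_markov_sequences frame_ids chunk_len sliding_window_len) := by unfold Pre_get_non_markov_sequences; infer_instance

def pvWitness_get_non_markov_sequences : List Int × Int × Int := ([3, 4, 5, 9], 2, 1)

def Spec_get_non_markov_sequences (frame_ids : List Int) (chunk_len : Int) (sliding_window_len : Int) (out : List (List Int)) : Prop := out = get_non_markov_sequences_alt frame_ids chunk_len sliding_window_len
instance (frame_ids : List Int) (chunk_len : Int) (sliding_window_len : Int) (out : List (List Int)) : Decidable (Spec_get_non_markov_sequences frame_ids chunk_len sliding_window_len out) := by unfold Spec_get_non_markov_sequences; infer_instance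

-- ===== CLAIM (what is proved, stated in full; the proofs are below) =====
def Claim_equal_get_non_markov_sequences : Prop := ∀ (frame_ids : List Int) (chunk_len : Int) (sliding_window_len : Int), Dom_get_non_markov_sequences frame_ids chunk_len sliding_window_len → Pre_get_non_markov_sequences frame_ids chunk_len sliding_window_len → Spec_get_non_markov_sequences frame_ids chunk_len sliding_window_len (get_non_markov_sequences frame_ids chunk_len sliding_window_len)

-- ===== LEMMAS AND PROOFS =====

lemma pyRange_pos_nil {s : Int} (a b : Int) (hs : 0 < s) (hba : b ≤ a) :
    PySem.List.pyRange a b s = [] := by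
  rw [PySem.List.pyRange_of_pos a b hs]
  simp [show ¬ a < b by omega]

lemma pyRange_pos_cons {s : Int} (a b : Int) (hs : 0 < s) (hab : a < b) :
    PySem.List.pyRange a b s = a :: PySem.List.pyRange (a + s) b s := by
  rw [PySem.List.pyRange_of_pos a b hs, PySem.List.pyRange_of_pos (a + s) b hs]
  have hnum : (b - a + s - 1) / s = (b - a - 1) / s + 1 := by
    have h : b - a + s - 1 = (b - a - 1) + 1 * s := by ring
    rw [h, Int.add_mul_ediv_right _ _ (by omega : s ≠ 0)]
  have hge : 0 ≤ (b - a - 1) / s := Int.ediv_nonneg (by omega) (by omega)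
  by_cases h2 : a + s < b
  · rw [if_pos hab, if_pos h2, (show b - (a + s) + s - 1 = b - a - 1 by ring), hnum,
      (show ((b - a - 1) / s + 1).toNat = ((b - a - 1) / s).toNat + 1 by omega),
      List.range_succ_eq_map, List.map_cons, List.map_map]
    refine congrArg₂ _ (by simp) (List.map_congr_left ?_)
    intro k _
    simp only [Function.comp_apply]
    push_cast
    ring
  · have hm : (b - a + s - 1) / s = 1 := by
      have q1 : 1 ≤ (b - a + s - 1) / s := (Int.le_ediv_iff_mul_le hs).mpr (by omega)
      have q2 : (b - a + s - 1) / s < 2 := (Int.ediv_lt_iff_lt_mul hs).mpr (by omega)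
      omega
    rw [if_pos hab, if_neg h2, hm]
    simp

lemma swLoop_eq (seg : List Int) (chunk step : Int) (hs : 0 < step) (i : Nat) :
    swLoop seg chunk step.toNat i
      = (PySem.List.pyRange (i : Int) (seg.length : Int) step).map
          (fun j => PySem.List.slice seg (some j) (some (j + chunk))) := by
  by_cases hi : i < seg.length
  · rw [swLoop, dif_pos ⟨hi, by omega⟩,
      pyRange_pos_cons (i : Int) (seg.length : Int) hs (by exact_mod_cast hi), List.map_cons,
      swLoop_eq seg chunk step hs (i + step.toNat),
      (show ((i + step.toNat : Nat) : Int) = (i : Int) + step by push_cast; omega)]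
  · rw [swLoop, dif_neg (by omega),
      pyRange_pos_nil (i : Int) (seg.length : Int) hs (by exact_mod_cast Nat.le_of_not_lt hi)]
    rfl
termination_by seg.length - i
decreasing_by omega

-- port-specific: the if inside Dict.insert leaves entries with other keys unchanged
lemma map_if_ne (front : List (Int × List Int)) (k : Int) (w : List Int)
    (h : ∀ p ∈ front, p.1 ≠ k) :
    front.map (fun p => if (p.1 == k) = true then (k, w) else p) = front := by
  calc front.map (fun p => if (p.1 == k) = true then (k, w) else p)
      = front.map id := List.map_congr_left (fun p hp => by simp [h p hp])
    _ = front := List.map_id front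

-- key invariant: the dict built by B over a strictly increasing tail always has the
-- current run as its last entry (key = value minus rank) and finished runs in front
lemma buildRuns_values (vs : List Int) (prev : Int) (i : Nat)
    (front : List (Int × List Int)) (cur : List Int)
    (hp : (prev :: vs).Pairwise (· < ·))
    (hfront : ∀ p ∈ front, p.1 < prev - (i : Int)) :
    (buildRuns ⟨front ++ [(prev - (i : Int), cur)]⟩ (i + 1) vs).values
      = front.map Prod.snd ++ splitGo prev cur vs := by
  induction vs generalizing prev i front cur with
  | nil => simp [buildRuns, PySem.Dict.values, splitGo]
  | cons v vs ih =>
    rw [List.pairwise_cons] at hp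
    obtain ⟨hlt, hp'⟩ := hp
    have hpv : prev < v := hlt v (List.mem_cons_self ..)
    rw [buildRuns]
    by_cases hv : v = prev + 1
    · -- consecutive: same key, the dict's last entry grows
      have hkey : v - ((i + 1 : Nat) : Int) = prev - (i : Int) := by push_cast; omega
      have hcont : (PySem.Dict.mk (front ++ [(prev - (i : Int), cur)])).contains (prev - (i : Int)) = true := by
        simp [PySem.Dict.contains]
      have hget : (PySem.Dict.mk (front ++ [(prev - (i : Int), cur)])).getD (prev - (i : Int)) [] = cur := by
        simp only [PySem.Dict.getD, PySem.Dict.get?, List.find?_append]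
        rw [List.find?_eq_none.mpr (fun p hpm => by
          simp only [beq_iff_eq]
          exact (ne_of_lt (hfront p hpm)))]
        simp
      have hd : ((PySem.Dict.mk (front ++ [(prev - (i : Int), cur)])).modify
            (v - ((i + 1 : Nat) : Int)) [] (· ++ [v]))
          = PySem.Dict.mk (front ++ [(v - ((i + 1 : Nat) : Int), cur ++ [v])]) := by
        apply PySem.Dict.ext
        rw [hkey, PySem.Dict.modify, hget, PySem.Dict.items_insert_of_contains _ _ hcont,
          List.map_append, map_if_ne front _ _ (fun p hpm => ne_of_lt (hfront p hpm))]
        simp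
      rw [hd, ih v (i + 1) front (cur ++ [v]) hp'
        (fun p hpm => by rw [hkey]; exact hfront p hpm)]
      rw [splitGo, if_pos hv]
    · -- gap: a larger fresh key, the finished run stays in front
      have hk1 : prev - (i : Int) < v - ((i + 1 : Nat) : Int) := by push_cast; omega
      have hcont : (PySem.Dict.mk (front ++ [(prev - (i : Int), cur)])).contains
          (v - ((i + 1 : Nat) : Int)) = false := by
        simp only [PySem.Dict.contains, List.any_append, List.any_cons, List.any_nil,
          Bool.or_false, Bool.or_eq_false_iff, List.any_eq_false, beq_iff_eq, beq_eq_false_iff_ne,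
          ne_eq]
        exact ⟨fun p hpm => ne_of_lt ((hfront p hpm).trans hk1), ne_of_lt hk1⟩
      have hd : ((PySem.Dict.mk (front ++ [(prev - (i : Int), cur)])).modify
            (v - ((i + 1 : Nat) : Int)) [] (· ++ [v]))
          = PySem.Dict.mk ((front ++ [(prev - (i : Int), cur)]) ++ [(v - ((i + 1 : Nat) : Int), [] ++ [v])]) := by
        apply PySem.Dict.ext
        rw [PySem.Dict.modify, PySem.Dict.getD_of_not_contains _ _ hcont,
          PySem.Dict.items_insert_of_not_contains _ _ hcont]
      rw [hd, ih v (i + 1) (front ++ [(prev - (i : Int), cur)]) ([] ++ [v]) hp'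
          (fun p hpm => by
            rcases List.mem_append.mp hpm with h | h
            · exact (hfront p h).trans hk1
            · simp only [List.mem_singleton] at h
              subst h
              exact hk1)]
      rw [splitGo, if_neg hv]
      simp

-- B's dict values are exactly A's continuous segments
lemma values_buildRuns (xs : List Int) (hp : xs.Pairwise (· < ·)) :
    (buildRuns PySem.Dict.empty 0 xs).values = split_continuous_segments xs := by
  cases xs with
  | nil => rfl
  | cons x t =>
    rw [buildRuns]
    have hd : (PySem.Dict.empty.modify (x - ((0 : Nat) : Int)) [] (· ++ [x]))
        = PySem.Dict.mk ([] ++ [(x - ((0 : Nat) : Int), [x])]) := by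
      apply PySem.Dict.ext
      rw [PySem.Dict.modify, PySem.Dict.items_insert_of_not_contains _ _ (by rfl)]
      rfl
    rw [hd, buildRuns_values t x 0 [] [x] hp (by simp)]
    rfl

-- ===== VERDICT (by name: the statement is the Claim_ definition above) =====
theorem get_non_markov_sequences_spec : Claim_equal_get_non_markov_sequences := by
  intro frame_ids chunk_len sliding_window_len _hdom hpre
  obtain ⟨hc, hs⟩ := hpre
  unfold Spec_get_non_markov_sequences get_non_markov_sequences get_non_markov_sequences_alt
  rw [if_neg (by omega), if_neg (by omega)]
  simp only
  rw [values_buildRuns _ (PySem.List.sorted_ofList_pairwise_lt frame_ids)]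
  generalize PySem.List.sorted (PySem.Set.ofList frame_ids) (fun x => x) false = cleaned
  rw [PySem.List.foldl_append_eq_flatMap, List.nil_append]
  refine List.flatMap_congr ?_ 
  intro seg _
  rw [show sliding_windows seg chunk_len sliding_window_len = swLoop seg chunk_len sliding_window_len.toNat 0 from rfl,
    swLoop_eq seg chunk_len sliding_window_len hs 0]
  norm_num
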